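-- pv_equiv track=rewrite | github.com/tswaehn/InnDex | processors/procDuplicates.py | __createMd5KeyTable
-- ===== SOURCE A (Python) =====
-- def __createMd5KeyTable( allFiles ):
--
--     md5KeyTable= dict()
--
--     for hashKey in allFiles:
--         entry= allFiles[hashKey]
--         md5Key= entry['md5']
--         if md5Key in md5KeyTable:
--             md5KeyTable[md5Key].append(  hashKey )
--         else:
--             md5KeyTable[md5Key]= list()
--             md5KeyTable[md5Key].append( hashKey )
--
--     return md5KeyTable
-- ===== SOURCE B (Python) =====
-- def __createMd5KeyTable(allFiles):
--     md5s = list(dict.fromkeys(allFiles[k]['md5'] for k in allFiles))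
--     return {m: [k for k in allFiles if allFiles[k]['md5'] == m] for m in md5s}
-- ===== Notes on version B (the rewrite author's own statement) =====
-- stated objective: alternative
-- what changed: Instead of one-pass hash-bucketing into a dict (append-or-create per key), B first computes the distinct md5 values in first-appearance order with dict.fromkeys and then builds each group by a comprehension scanning allFiles, trading the incremental table for a dedup-then-filter grouping.
-- outside the precondition, e.g. on __createMd5KeyTable({'a': {}}): A raises KeyError, B raises KeyError
import Mathlib
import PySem

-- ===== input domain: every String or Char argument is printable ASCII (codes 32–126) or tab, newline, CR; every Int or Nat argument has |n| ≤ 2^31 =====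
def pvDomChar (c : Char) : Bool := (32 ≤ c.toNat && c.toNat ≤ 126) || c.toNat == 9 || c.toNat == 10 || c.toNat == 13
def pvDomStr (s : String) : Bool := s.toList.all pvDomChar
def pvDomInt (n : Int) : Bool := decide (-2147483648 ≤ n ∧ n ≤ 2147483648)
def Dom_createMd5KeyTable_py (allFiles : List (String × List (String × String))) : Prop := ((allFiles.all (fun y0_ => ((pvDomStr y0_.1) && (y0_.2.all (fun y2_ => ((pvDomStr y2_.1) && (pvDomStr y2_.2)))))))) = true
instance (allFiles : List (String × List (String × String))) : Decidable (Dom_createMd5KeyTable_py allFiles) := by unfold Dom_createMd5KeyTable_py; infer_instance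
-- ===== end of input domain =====

-- B groups by computing the distinct md5 values first (dict.fromkeys) and then one
-- comprehension per md5 value, instead of A's incremental append-or-create bucketing.
-- ===== PORT A =====
def createMd5KeyTable_py (allFiles : List (String × List (String × String))) : List (String × List String) :=
  -- entry['md5'] ported as getD "md5" ""; Pre_ guarantees the key is present (else Python raises KeyError)
  ((PySem.Dict.ofList allFiles).items.foldl (fun md5KeyTable hk =>
    if md5KeyTable.contains ((PySem.Dict.ofList hk.2).getD "md5" "") then
      md5KeyTable.modify ((PySem.Dict.ofList hk.2).getD "md5" "") [] (fun l => l ++ [hk.1])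
    else
      (md5KeyTable.insert ((PySem.Dict.ofList hk.2).getD "md5" "") ([] : List String)).modify
        ((PySem.Dict.ofList hk.2).getD "md5" "") [] (fun l => l ++ [hk.1]))
    PySem.Dict.empty).items

-- ===== PORT B =====
def createMd5KeyTable_py_alt (allFiles : List (String × List (String × String))) : List (String × List String) :=
  (PySem.List.dedup ((PySem.Dict.ofList allFiles).items.map (fun p => (PySem.Dict.ofList p.2).getD "md5" ""))).map
    (fun m => (m, ((PySem.Dict.ofList allFiles).items.filter
      (fun p => (PySem.Dict.ofList p.2).getD "md5" "" == m)).map (fun p => p.1)))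

-- ===== PRECONDITION & SPEC =====
-- Pre_ excludes exactly the inputs where some entry lacks the 'md5' key, on which Python A raises KeyError.
def Pre_createMd5KeyTable_py (allFiles : List (String × List (String × String))) : Prop :=
  ∀ p ∈ allFiles, "md5" ∈ p.2.map Prod.fst
instance (allFiles : List (String × List (String × String))) : Decidable (Pre_createMd5KeyTable_py allFiles) := by unfold Pre_createMd5KeyTable_py; infer_instance
def pvWitness_createMd5KeyTable_py : (List (String × List (String × String))) := [("a", [("md5","x")]), ("b", [("md5","x"),("sz","3")])]
def Spec_createMd5KeyTable_py (allFiles : List (String × List (String × String))) (out : List (String × List String)) : Prop := out = createMd5KeyTable_py_alt allFiles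
instance (allFiles : List (String × List (String × String))) (out : List (String × List String)) : Decidable (Spec_createMd5KeyTable_py allFiles out) := by unfold Spec_createMd5KeyTable_py; infer_instance

-- ===== CLAIM (what is proved, stated in full; the proofs are below) =====
def Claim_equal_createMd5KeyTable_py : Prop := ∀ (allFiles : List (String × List (String × String))), Dom_createMd5KeyTable_py allFiles → Pre_createMd5KeyTable_py allFiles → Spec_createMd5KeyTable_py allFiles (createMd5KeyTable_py allFiles)

-- ===== LEMMAS AND PROOFS =====

-- the md5 of one entry, as both ports compute it
def pvMd5 (p : String × List (String × String)) : String := (PySem.Dict.ofList p.2).getD "md5" ""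

-- A's loop body (contains? append : create-then-append) is exactly one Dict.modify
theorem pvStep_eq (d : PySem.Dict String (List String)) (k x : String) :
    (if d.contains k then d.modify k [] (fun l => l ++ [x])
     else (d.insert k ([] : List String)).modify k [] (fun l => l ++ [x]))
      = d.modify k [] (fun l => l ++ [x]) := by
  by_cases h : d.contains k
  · simp [h]
  · simp only [Bool.not_eq_true] at h
    simp only [h, Bool.false_eq_true, if_false, PySem.Dict.modify,
      PySem.Dict.getD_insert_self, List.nil_append, PySem.Dict.getD_of_not_contains d _ h,
      PySem.Dict.insert_insert_self]

theorem pv_main (allFiles : List (String × List (String × String))) :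
    createMd5KeyTable_py allFiles = createMd5KeyTable_py_alt allFiles := by
  unfold createMd5KeyTable_py createMd5KeyTable_py_alt
  have hfun : (fun (md5KeyTable : PySem.Dict String (List String)) (hk : String × List (String × String)) =>
      if md5KeyTable.contains ((PySem.Dict.ofList hk.2).getD "md5" "") then
        md5KeyTable.modify ((PySem.Dict.ofList hk.2).getD "md5" "") [] (fun l => l ++ [hk.1])
      else
        (md5KeyTable.insert ((PySem.Dict.ofList hk.2).getD "md5" "") ([] : List String)).modify
          ((PySem.Dict.ofList hk.2).getD "md5" "") [] (fun l => l ++ [hk.1]))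
      = fun d hk => d.modify (pvMd5 hk) [] (fun l => l ++ [hk.1]) := by
    funext d hk
    exact pvStep_eq d (pvMd5 hk) hk.1
  rw [hfun]
  set items := (PySem.Dict.ofList allFiles).items with hitems
  have hmapfold : items.foldl (fun d hk => d.modify (pvMd5 hk) [] (fun l => l ++ [hk.1])) PySem.Dict.empty
      = (items.map (fun p => (pvMd5 p, p.1))).foldl (fun d q => d.modify q.1 [] (fun l => l ++ [q.2])) PySem.Dict.empty := by
    rw [List.foldl_map]
  rw [hmapfold]
  set pairs := items.map (fun p => (pvMd5 p, p.1)) with hpairs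
  set table := pairs.foldl (fun d q => d.modify q.1 [] (fun l => l ++ [q.2])) PySem.Dict.empty with htable
  have hnodup : table.keys.Nodup := by
    rw [htable]
    exact PySem.Dict.nodup_keys_foldl_modify_key pairs Prod.fst [] (fun d q l => l ++ [q.2])
      PySem.Dict.empty (by simp)
  have hkeys : table.keys = PySem.List.dedup (items.map pvMd5) := by
    rw [htable]
    rw [PySem.Dict.keys_foldl_modify_key pairs Prod.fst [] (fun d q l => l ++ [q.2]) PySem.Dict.empty]
    rw [PySem.List.dedup_eq_ofList]
    simp [hpairs, PySem.Set.update_nil_left, List.map_map, Function.comp_def]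
  have hgetD : ∀ c, table.getD c [] = (pairs.filter (fun q => q.1 == c)).map (fun q => q.2) := by
    intro c
    rw [htable, PySem.Dict.getD_foldl_modify_append]
    simp
  rw [PySem.Dict.items_eq_map_keys table hnodup []]
  rw [hkeys]
  have hmd5s : (items.map fun p => (PySem.Dict.ofList p.2).getD "md5" "") = items.map pvMd5 := rfl
  rw [hmd5s]
  apply List.map_congr_left
  intro m _
  rw [hgetD m, hpairs]
  rw [List.filter_map, List.map_map]
  congr 1

-- ===== VERDICT (by name: the statement is the Claim_ definition above) =====
theorem createMd5KeyTable_py_spec : Claim_equal_createMd5KeyTable_py := by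
  intro allFiles _ _
  exact pv_main allFiles
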